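-- pv_equiv track=rewrite | github.com/DiegoEstevesSilva/aocday3 | day3 Part2.py | split_in_groups
-- ===== SOURCE A (Python) =====
-- def split_in_groups(items: list[str]):
--     group_items = []
--     groups_list = []
--     for idx, item in enumerate(items, start=1):
--         group_items.append(item)
--         if idx % 3 == 0:
--             groups_list.append(group_items.copy())
--             group_items.clear()
--     return groups_list
-- ===== SOURCE B (Python) =====
-- def split_in_groups(items: list[str]):
--     stop = len(items) - len(items) % 3
--     return [items[i:i + 3] for i in range(0, stop, 3)]
-- ===== Notes on version B (the rewrite author's own statement) =====
-- stated objective: alternative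
-- what changed: Replaced the element-by-element accumulate-and-flush loop (buffer list + idx % 3 counter) by direct index arithmetic: compute the cutoff for complete groups and slice each group out at stride-3 start indices; no buffer or counter is maintained.
import Mathlib
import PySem

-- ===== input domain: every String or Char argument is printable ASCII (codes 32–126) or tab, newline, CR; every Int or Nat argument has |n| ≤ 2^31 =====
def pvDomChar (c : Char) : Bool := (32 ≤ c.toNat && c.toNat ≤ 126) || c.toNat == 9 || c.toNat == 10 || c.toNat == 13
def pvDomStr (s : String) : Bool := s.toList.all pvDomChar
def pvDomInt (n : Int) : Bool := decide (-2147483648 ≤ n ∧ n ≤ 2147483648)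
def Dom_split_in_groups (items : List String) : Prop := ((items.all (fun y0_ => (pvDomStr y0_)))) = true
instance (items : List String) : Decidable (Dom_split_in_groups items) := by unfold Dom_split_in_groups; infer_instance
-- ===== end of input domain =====

-- B replaces A's accumulate-and-flush loop (buffer + idx % 3 counter) by index arithmetic:
-- it slices out each complete group at stride-3 start indices; same return value.

-- ===== PORT A =====
-- A-side helper: the loop body; state is (idx, group_items, groups_list), idx the 1-based enumerate counter
def pvStepA (st : Int × List String × List (List String)) (item : String) :
    Int × List String × List (List String) :=
  let idx := st.1 + 1
  let group_items := st.2.1 ++ [item]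
  if PySem.Int.mod idx 3 == 0 then (idx, [], st.2.2 ++ [group_items])
  else (idx, group_items, st.2.2)

def split_in_groups (items : List String) : List (List String) :=
  (items.foldl pvStepA (0, [], [])).2.2

-- ===== PORT B =====
def split_in_groups_alt (items : List String) : List (List String) :=
  let stop : Int := (items.length : Int) - PySem.Int.mod (items.length : Int) 3
  (PySem.List.pyRange 0 stop 3).map
    (fun i => PySem.List.slice items (some i) (some (i + 3)))

-- ===== PRECONDITION & SPEC =====
def Spec_split_in_groups (items : List String) (out : List (List String)) : Prop := out = split_in_groups_alt items
instance (items : List String) (out : List (List String)) : Decidable (Spec_split_in_groups items out) := by unfold Spec_split_in_groups; infer_instance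

-- ===== CLAIM (what is proved, stated in full; the proofs are below) =====
def Claim_equal_split_in_groups : Prop := ∀ (items : List String), Dom_split_in_groups items → Spec_split_in_groups items (split_in_groups items)

-- ===== LEMMAS AND PROOFS =====

-- proof-side chunking function: both ports are shown equal to it
def pvChunk3 (items : List String) : List (List String) :=
  match items with
  | x :: y :: z :: rest => [x, y, z] :: pvChunk3 rest
  | _ => []

lemma mod3_a (k : Int) : (PySem.Int.mod (3 * k + 1) 3 == 0) = false := by
  simp

lemma mod3_b (k : Int) : (PySem.Int.mod (3 * k + 1 + 1) 3 == 0) = false := by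
  simp; omega

lemma mod3_c (k : Int) : (PySem.Int.mod (3 * k + 1 + 1 + 1) 3 == 0) = true := by
  simp; omega

-- ===== A-side: the loop invariant =====
-- starting at an index divisible by 3 with an empty buffer, the fold appends exactly the chunks
lemma foldA_inv (items : List String) (k : Int) (gs : List (List String)) :
    ((items.foldl pvStepA (3 * k, [], gs)).2.2) = gs ++ pvChunk3 items := by
  match items with
  | [] => simp [pvChunk3]
  | [a] =>
      simp only [List.foldl_cons, List.foldl_nil, pvStepA, mod3_a k, if_false,
        Bool.false_eq_true]
      simp [pvChunk3]
  | [a, b] =>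
      simp only [List.foldl_cons, List.foldl_nil, pvStepA, mod3_a k, mod3_b k, if_false,
        Bool.false_eq_true]
      simp [pvChunk3]
  | a :: b :: c :: rest =>
      have step : (([a, b, c] : List String).foldl pvStepA (3 * k, [], gs)) =
          (3 * k + 1 + 1 + 1, [], gs ++ [[a, b, c]]) := by
        simp only [List.foldl_cons, List.foldl_nil, pvStepA, mod3_a k, mod3_b k, mod3_c k,
          if_true, if_false, Bool.false_eq_true]
        simp
      have hsplit : ((a :: b :: c :: rest).foldl pvStepA (3 * k, [], gs)) =
          rest.foldl pvStepA (3 * k + 1 + 1 + 1, [], gs ++ [[a, b, c]]) := by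
        show (([a, b, c] ++ rest).foldl pvStepA (3 * k, [], gs)) = _
        rw [List.foldl_append, step]
      rw [hsplit]
      have hrec := foldA_inv rest (k + 1) (gs ++ [[a, b, c]])
      have h33 : 3 * (k + 1) = 3 * k + 1 + 1 + 1 := by ring
      rw [h33] at hrec
      rw [hrec]
      simp [pvChunk3]
termination_by items.length

-- ===== B-side: the stride-3 comprehension computes the chunks =====
lemma range_map_slice (items : List String) :
    (List.range (items.length / 3)).map
      (fun (k : Nat) => PySem.List.slice items (some (3 * (k : Int))) (some (3 * (k : Int) + 3)))
      = pvChunk3 items := by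
  match items with
  | [] => simp [pvChunk3]
  | [a] => simp [pvChunk3]
  | [a, b] => simp [pvChunk3]
  | a :: b :: c :: rest =>
      have hq : (a :: b :: c :: rest).length / 3 = rest.length / 3 + 1 := by
        simp; omega
      rw [hq, List.range_succ_eq_map, List.map_cons, List.map_map]
      have h0 : PySem.List.slice (a :: b :: c :: rest) (some (3 * ((0 : Nat) : Int)))
          (some (3 * ((0 : Nat) : Int) + 3)) = [a, b, c] := by
        rw [show (3 * ((0 : Nat) : Int)) = 0 by simp]
        rw [PySem.List.slice_toNat (a :: b :: c :: rest) (by omega) (by omega)]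
        simp
      have hsucc : ∀ k : Nat,
          PySem.List.slice (a :: b :: c :: rest) (some (3 * ((k + 1 : Nat) : Int)))
              (some (3 * ((k + 1 : Nat) : Int) + 3))
            = PySem.List.slice rest (some (3 * (k : Int))) (some (3 * (k : Int) + 3)) := by
        intro k
        rw [PySem.List.slice_toNat _ (by positivity) (by positivity),
            PySem.List.slice_toNat _ (by positivity) (by positivity)]
        have e1 : (3 * ((k + 1 : Nat) : Int)).toNat = 3 * k + 3 := by push_cast; omega
        have e2 : (3 * ((k + 1 : Nat) : Int) + 3).toNat = 3 * k + 3 + 3 := by push_cast; omega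
        have e3 : (3 * (k : Int)).toNat = 3 * k := by omega
        have e4 : (3 * (k : Int) + 3).toNat = 3 * k + 3 := by omega
        rw [e1, e2, e3, e4]
        have hdrop : (a :: b :: c :: rest).drop (3 * k + 3) = rest.drop (3 * k) := by
          rw [show 3 * k + 3 = 3 + 3 * k by ring, ← List.drop_drop]
          simp
        rw [hdrop]
        congr 1
        omega
      rw [h0]
      have : (List.range (rest.length / 3)).map
          ((fun (k : Nat) => PySem.List.slice (a :: b :: c :: rest) (some (3 * (k : Int)))
            (some (3 * (k : Int) + 3))) ∘ Nat.succ)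
          = (List.range (rest.length / 3)).map
            (fun (k : Nat) => PySem.List.slice rest (some (3 * (k : Int))) (some (3 * (k : Int) + 3))) := by
        apply List.map_congr_left
        intro k _
        exact hsucc k
      rw [this, range_map_slice rest]
      simp [pvChunk3]
termination_by items.length

lemma alt_eq_chunk (items : List String) : split_in_groups_alt items = pvChunk3 items := by
  show (PySem.List.pyRange 0 ((items.length : Int) - PySem.Int.mod (items.length : Int) 3) 3).map
      (fun i => PySem.List.slice items (some i) (some (i + 3))) = pvChunk3 items
  have hstop : ((items.length : Int) - PySem.Int.mod (items.length : Int) 3)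
      = 3 * ((items.length / 3 : Nat) : Int) := by
    simp [PySem.Int.mod, Int.fmod_eq_emod]
    omega
  rw [hstop, PySem.List.pyRange_of_pos 0 _ (by omega : (0:Int) < 3)]
  have hcount : (if (0:Int) < 3 * ((items.length / 3 : Nat) : Int)
      then ((3 * ((items.length / 3 : Nat) : Int) - 0 + 3 - 1) / 3).toNat else 0)
      = items.length / 3 := by
    split_ifs with h
    · omega
    · omega
  rw [hcount, List.map_map]
  have := range_map_slice items
  rw [← this]
  apply List.map_congr_left
  intro k _
  simp

-- ===== VERDICT (by name: the statement is the Claim_ definition above) =====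
theorem split_in_groups_spec : Claim_equal_split_in_groups := by
  intro items _
  unfold Spec_split_in_groups split_in_groups
  rw [alt_eq_chunk]
  have h := foldA_inv items 0 []
  rw [show (3 * (0:Int)) = 0 by ring] at h
  simpa using h
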